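-- pv_equiv track=rewrite | github.com/ProgMann228/algorithms_laba2-jpeg- | py_files/AC_DC.py | AC_coding
-- ===== SOURCE A (Python) =====
-- def AC_coding(AC_blocks):
--     AC_coded_blocks=[]
--     for (y, x, ACmas) in AC_blocks:
--         coded = []
--         for a in ACmas:
--             if a == 0:
--                 size = 0
--                 value = ''
--             else:
--                 size = len(bin(abs(a))) - 2  # -2 потому что 0b в начале#value
--                 if a > 0:
--                     value = bin(a)[2:]
--                 else:
--                     # инвертируем строку битов от abs(a)
--                     bits = bin(abs(a))[2:].zfill(size)  # дополняем до size
--                     value = ''.join('1' if b == '0' else '0' for b in bits)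
--             coded.append((size, value))
--         AC_coded_blocks.append((y, x, coded))
--     return AC_coded_blocks
-- ===== SOURCE B (Python) =====
-- def AC_coding(AC_blocks):
--     out = []
--     for (y, x, ACmas) in AC_blocks:
--         coded = []
--         for a in ACmas:
--             n = abs(a)
--             neg = a < 0
--             rev = []
--             while n:
--                 rev.append('0' if (n & 1 == 1) == neg else '1')
--                 n >>= 1
--             coded.append((len(rev), ''.join(reversed(rev))))
--         out.append((y, x, coded))
--     return out
-- ===== Notes on version B (the rewrite author's own statement) =====
-- stated objective: alternative
-- what changed: Instead of formatting with bin()/zfill and a separate per-character inversion pass with a sign branch and an a==0 special case, B extracts the bits itself LSB-first with shift/mask in one while loop whose emitted bit is XORed with the sign, then reverses; the zero case falls out of the loop naturally.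
import Mathlib
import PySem

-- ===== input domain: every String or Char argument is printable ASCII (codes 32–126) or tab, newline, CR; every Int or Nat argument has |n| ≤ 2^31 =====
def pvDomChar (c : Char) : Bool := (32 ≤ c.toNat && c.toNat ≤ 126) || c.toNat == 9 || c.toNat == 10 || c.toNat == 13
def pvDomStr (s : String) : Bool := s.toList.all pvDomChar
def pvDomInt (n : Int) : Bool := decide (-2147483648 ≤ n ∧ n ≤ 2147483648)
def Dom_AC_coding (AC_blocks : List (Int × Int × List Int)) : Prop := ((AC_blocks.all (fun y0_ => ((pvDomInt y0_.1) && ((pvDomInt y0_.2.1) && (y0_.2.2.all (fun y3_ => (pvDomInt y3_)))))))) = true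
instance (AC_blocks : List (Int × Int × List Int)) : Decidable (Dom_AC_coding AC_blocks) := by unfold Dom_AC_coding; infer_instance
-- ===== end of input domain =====

-- B drops bin()/zfill/per-character inversion: it extracts the bits itself LSB-first with
-- shift/mask, XORing each emitted bit with the sign, then reverses; objective: alternative.

-- ===== PORT A =====
-- Binary digit string of a natural number, MSB first: exactly Python's bin(n)[2:].
def binChars (n : Nat) : List Char :=
  if n < 2 then [if n = 1 then '1' else '0']
  else binChars (n / 2) ++ [if n % 2 = 1 then '1' else '0']
decreasing_by exact Nat.div_lt_self (by omega) (by omega)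

-- str.zfill for an unsigned digit string (bin strings here never carry a sign): exact.
def pyZfill (w : Nat) (s : List Char) : List Char := List.replicate (w - s.length) '0' ++ s

-- the body of A's inner loop, per coefficient
def encA (a : Int) : Int × String :=
  if a = 0 then ((0 : Int), "")
  else
    let size := (binChars a.natAbs).length      -- len(bin(abs(a))) - 2
    if a > 0 then ((size : Int), String.ofList (binChars a.natAbs))  -- bin(a)[2:]
    else
      let bits := pyZfill size (binChars a.natAbs)               -- zfill(size)
      ((size : Int), String.ofList (bits.map (fun b => if b = '0' then '1' else '0')))

def AC_coding (AC_blocks : List (Int × Int × List Int)) : List (Int × Int × (List (Int × String))) :=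
  AC_blocks.map (fun blk => (blk.1, blk.2.1, blk.2.2.map encA))

-- ===== PORT B =====
-- B's while loop: emit bits of n LSB-first, each bit XORed with the sign flag.
def bitsRev (neg : Bool) (n : Nat) : List Char :=
  if n = 0 then []
  else (if (n % 2 = 1) = (neg = true) then '0' else '1') :: bitsRev neg (n / 2)
decreasing_by exact Nat.div_lt_self (by omega) (by omega)

-- the body of B's inner loop, per coefficient (no zero special case)
def encB (a : Int) : Int × String :=
  let rev := bitsRev (decide (a < 0)) a.natAbs
  ((rev.length : Int), String.ofList rev.reverse)

def AC_coding_alt (AC_blocks : List (Int × Int × List Int)) : List (Int × Int × (List (Int × String))) :=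
  AC_blocks.map (fun blk => (blk.1, blk.2.1, blk.2.2.map encB))

-- ===== PRECONDITION & SPEC =====
def Spec_AC_coding (AC_blocks : List (Int × Int × List Int)) (out : List (Int × Int × (List (Int × String)))) : Prop := out = AC_coding_alt AC_blocks
instance (AC_blocks : List (Int × Int × List Int)) (out : List (Int × Int × (List (Int × String)))) : Decidable (Spec_AC_coding AC_blocks out) := by unfold Spec_AC_coding; infer_instance

-- ===== CLAIM (what is proved, stated in full; the proofs are below) =====
def Claim_equal_AC_coding : Prop := ∀ (AC_blocks : List (Int × Int × List Int)), Dom_AC_coding AC_blocks → Spec_AC_coding AC_blocks (AC_coding AC_blocks)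

-- ===== LEMMAS AND PROOFS =====

lemma bitsRev_false (n : Nat) (h : 1 ≤ n) : (bitsRev false n).reverse = binChars n := by
  induction n using Nat.strong_induction_on with
  | _ n ih =>
    rw [bitsRev, binChars]
    by_cases hlt : n < 2
    · have h1 : n = 1 := by omega
      subst h1
      simp [bitsRev]
    · have hq : 1 ≤ n / 2 := by omega
      have := ih (n / 2) (Nat.div_lt_self (by omega) (by omega)) hq
      simp only [show ¬ n = 0 from by omega, if_false, hlt, List.reverse_cons, this]
      rcases Nat.mod_two_eq_zero_or_one n with hr | hr <;> simp [hr]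

lemma bitsRev_true (n : Nat) (h : 1 ≤ n) :
    (bitsRev true n).reverse = (binChars n).map (fun b => if b = '0' then '1' else '0') := by
  induction n using Nat.strong_induction_on with
  | _ n ih =>
    rw [bitsRev, binChars]
    by_cases hlt : n < 2
    · have h1 : n = 1 := by omega
      subst h1
      simp [bitsRev]
    · have hq : 1 ≤ n / 2 := by omega
      have := ih (n / 2) (Nat.div_lt_self (by omega) (by omega)) hq
      simp only [show ¬ n = 0 from by omega, if_false, hlt, List.reverse_cons, this,
        List.map_append]
      rcases Nat.mod_two_eq_zero_or_one n with hr | hr <;> simp [hr]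

lemma enc_eq (a : Int) : encA a = encB a := by
  by_cases h0 : a = 0
  · subst h0; simp [encA, encB, bitsRev, String.ofList]; rfl
  · have hn : 1 ≤ a.natAbs := by omega
    by_cases hpos : a > 0
    · have hneg : decide (a < 0) = false := by simp; omega
      have hlen : (bitsRev false a.natAbs).length = (binChars a.natAbs).length := by
        rw [← List.length_reverse (as := bitsRev false a.natAbs), bitsRev_false a.natAbs hn]
      simp only [encA, encB, h0, hpos, if_true, if_false, hneg, hlen]
      rw [← bitsRev_false a.natAbs hn]
    · have hneg : decide (a < 0) = true := by simp; omega
      have hz : pyZfill (binChars a.natAbs).length (binChars a.natAbs) = binChars a.natAbs := by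
        unfold pyZfill; simp
      have hlen : (bitsRev true a.natAbs).length = (binChars a.natAbs).length := by
        rw [← List.length_reverse (as := bitsRev true a.natAbs), bitsRev_true a.natAbs hn]
        simp
      simp only [encA, encB, h0, hpos, if_false, hneg, hz, hlen]
      rw [← bitsRev_true a.natAbs hn]

-- ===== VERDICT (by name: the statement is the Claim_ definition above) =====
theorem AC_coding_spec : Claim_equal_AC_coding := by
  intro l _
  unfold Spec_AC_coding AC_coding AC_coding_alt
  simp [enc_eq]
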